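-- pv_equiv track=rewrite | github.com/ja-simko/logik | alt_compare_guess_game_set.py | compare_sets
-- ===== SOURCE A (Python) =====
-- def compare_sets(guess_list, game_list, agg_hints):
--     hints = list()
--     def color_and_position():
--         game_list_mod = game_list.copy()
--         guess_list_mod = guess_list.copy()
--         for pos,letter in enumerate(guess_list):
--             if letter == game_list[pos]:
--                 hints.append(0)
--                 game_list_mod[pos] = 0
--                 guess_list_mod[pos] = 0
--         return game_list_mod, guess_list_mod, hints
--
--     def only_color(game_list, guess_list,hints):
--         for letter in guess_list:
--             if letter != 0 and letter in game_list:
--                 place = game_list.index(letter)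
--                 game_list[place] = 0
--                 hints.append(1)
--         return hints
--
--     game_list_mod, guess_list_mod, hints = color_and_position()
--     hints = only_color(game_list_mod, guess_list_mod, hints)
--     agg_hints.append(hints)
--     return agg_hints
-- ===== SOURCE B (Python) =====
-- def compare_sets(guess_list, game_list, agg_hints):
--     black = sum(letter == game_list[pos] for pos, letter in enumerate(guess_list))
--     total = sum(min(guess_list.count(c), game_list.count(c)) for c in set(guess_list))
--     agg_hints.append([0] * black + [1] * (total - black))
--     return agg_hints
-- ===== Notes on version B (the rewrite author's own statement) =====
-- stated objective: simpler
-- what changed: Replaces the two destructive scan-and-zero passes (positional pass writing sentinel 0s, then a .index/in-place-overwrite pass per leftover letter) with a closed-form count: black = positional matches (indexing game_list[pos] as A does), white = sum over distinct guess colours of min(guess count, secret count) minus black.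
-- intended difference: On inputs where the colour 0 could earn a white peg (a 0 at a non-matching position of the guess and a 0 at a non-matching position of the secret), A under-reports the white hints because it uses the literal 0 as its internal consumed-slot sentinel and skips it, while B counts 0 like any other colour, which is the intended Mastermind score. — e.g. on compare_sets([1, 0], [0, 1], []): A returns [[1]], B returns [[1, 1]]
import Mathlib
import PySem

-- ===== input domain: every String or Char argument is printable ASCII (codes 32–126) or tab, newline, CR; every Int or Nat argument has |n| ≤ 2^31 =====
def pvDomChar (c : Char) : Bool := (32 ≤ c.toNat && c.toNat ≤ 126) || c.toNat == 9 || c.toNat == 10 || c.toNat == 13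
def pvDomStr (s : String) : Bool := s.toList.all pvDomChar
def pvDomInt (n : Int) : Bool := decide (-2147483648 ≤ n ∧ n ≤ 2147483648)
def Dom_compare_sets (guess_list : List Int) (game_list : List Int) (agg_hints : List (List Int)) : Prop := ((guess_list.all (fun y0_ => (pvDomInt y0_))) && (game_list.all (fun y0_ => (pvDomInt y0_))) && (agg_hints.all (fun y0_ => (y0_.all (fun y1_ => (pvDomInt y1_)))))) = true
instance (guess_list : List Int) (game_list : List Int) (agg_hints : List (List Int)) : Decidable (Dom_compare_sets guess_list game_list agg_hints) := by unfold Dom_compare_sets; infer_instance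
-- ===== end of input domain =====

-- B replaces A's two destructive scan-and-zero passes by closed-form counts (black = positional
-- matches via the same game_list[pos] indexing, white = Σ_{distinct colours} min − black):
-- simpler, not measured faster. A mutates agg_hints in place (append); the equivalence proved
-- here is about the return value (B performs the same append).

-- ===== PORT A =====
-- inner helper color_and_position: positional pass; game_list[pos] raises IndexError when the
-- guess is longer than the secret — excluded by Pre_; in range, pyGetD equals that access.
def color_and_position (guess_list : List Int) (game_list : List Int) (hints : List Int) :
    List Int × List Int × List Int :=
  (PySem.List.enumerate guess_list).foldl
    (fun st pl =>
      if pl.2 = PySem.List.pyGetD game_list pl.1 0 then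
        (st.1.set pl.1.toNat 0, st.2.1.set pl.1.toNat 0, st.2.2 ++ [0])
      else st)
    (game_list, guess_list, hints)

-- inner helper only_color: per leftover letter, zero the first matching secret slot
def only_color (game_list : List Int) (guess_list : List Int) (hints : List Int) :
    List Int × List Int :=
  guess_list.foldl
    (fun st letter =>
      if letter ≠ 0 ∧ letter ∈ st.1 then
        (st.1.set ((PySem.List.index? st.1 letter).getD 0) 0, st.2 ++ [1])
      else st)
    (game_list, hints)

def compare_sets (guess_list : List Int) (game_list : List Int) (agg_hints : List (List Int)) :
    List (List Int) :=
  let t := color_and_position guess_list game_list []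
  let r := only_color t.1 t.2.1 t.2.2
  agg_hints ++ [r.2]

-- ===== PORT B =====
-- black reads game_list[pos] exactly as Source B does (IndexError when the guess is longer than the
-- secret — excluded by Pre_; in range, pyGetD equals that access).
def compare_sets_alt (guess_list : List Int) (game_list : List Int) (agg_hints : List (List Int)) :
    List (List Int) :=
  let black : Int :=
    (PySem.List.enumerate guess_list).foldl
      (fun acc pl => acc + (if pl.2 = PySem.List.pyGetD game_list pl.1 0 then 1 else 0)) 0
  let total : Int :=
    (PySem.Set.ofList guess_list).foldl
      (fun acc c => acc + min ((PySem.List.count guess_list c : Int))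
                            ((PySem.List.count game_list c : Int))) 0
  agg_hints ++ [List.replicate black.toNat 0 ++ List.replicate (total - black).toNat 1]

-- ===== PRECONDITION & SPEC =====
-- Pre_ excludes exactly the inputs where A raises IndexError at game_list[pos]
-- (guess longer than secret); B raises there too.
def Pre_compare_sets (guess_list : List Int) (game_list : List Int) (agg_hints : List (List Int)) : Prop :=
  guess_list.length ≤ game_list.length
instance (guess_list : List Int) (game_list : List Int) (agg_hints : List (List Int)) : Decidable (Pre_compare_sets guess_list game_list agg_hints) := by unfold Pre_compare_sets; infer_instance
def pvWitness_compare_sets : List Int × List Int × List (List Int) := ([1, 2], [2, 1, 3], [[0]])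

-- On inputs where colour 0 could earn a white peg (a 0 at a non-matching position of the guess AND
-- a 0 at a non-matching position of the secret), A under-reports the white hints because it uses
-- the literal 0 as its internal consumed-slot sentinel and skips it, while B counts 0 like any
-- other colour, which is the intended Mastermind score.
def D_compare_sets (guess_list : List Int) (game_list : List Int) (agg_hints : List (List Int)) : Prop :=
  ((guess_list.zip game_list).countP (fun p => decide (p.1 = 0 ∧ p.2 = 0)) < guess_list.count 0) ∧
  ((guess_list.zip game_list).countP (fun p => decide (p.1 = 0 ∧ p.2 = 0)) < game_list.count 0)
instance (guess_list : List Int) (game_list : List Int) (agg_hints : List (List Int)) : Decidable (D_compare_sets guess_list game_list agg_hints) := by unfold D_compare_sets; infer_instance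

def Spec_compare_sets (guess_list : List Int) (game_list : List Int) (agg_hints : List (List Int)) (out : List (List Int)) : Prop := ¬ D_compare_sets guess_list game_list agg_hints → out = compare_sets_alt guess_list game_list agg_hints
instance (guess_list : List Int) (game_list : List Int) (agg_hints : List (List Int)) (out : List (List Int)) : Decidable (Spec_compare_sets guess_list game_list agg_hints out) := by unfold Spec_compare_sets; infer_instance

def pvDiffWitness_compare_sets : List Int × List Int × List (List Int) := ([1, 0], [0, 1], [])
def pvDiffWitnessOut_compare_sets : (List (List Int)) × (List (List Int)) := ([[1]], [[1, 1]])

-- ===== CLAIM (what is proved, stated in full; the proofs are below) =====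
def Claim_unchanged_compare_sets : Prop := ∀ (guess_list : List Int) (game_list : List Int) (agg_hints : List (List Int)), Dom_compare_sets guess_list game_list agg_hints → Pre_compare_sets guess_list game_list agg_hints → Spec_compare_sets guess_list game_list agg_hints (compare_sets guess_list game_list agg_hints)
def Claim_changed_compare_sets : Prop := Dom_compare_sets (pvDiffWitness_compare_sets.1) (pvDiffWitness_compare_sets.2.1) (pvDiffWitness_compare_sets.2.2) ∧ Pre_compare_sets (pvDiffWitness_compare_sets.1) (pvDiffWitness_compare_sets.2.1) (pvDiffWitness_compare_sets.2.2) ∧ D_compare_sets (pvDiffWitness_compare_sets.1) (pvDiffWitness_compare_sets.2.1) (pvDiffWitness_compare_sets.2.2) ∧ compare_sets (pvDiffWitness_compare_sets.1) (pvDiffWitness_compare_sets.2.1) (pvDiffWitness_compare_sets.2.2) = pvDiffWitnessOut_compare_sets.1 ∧ compare_sets_alt (pvDiffWitness_compare_sets.1) (pvDiffWitness_compare_sets.2.1) (pvDiffWitness_compare_sets.2.2) = pvDiffWitnessOut_compare_sets.2 ∧ pvDiffWitnessOut_compare_sets.1 ≠ pvDiffWitnessOut_compare_sets.2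
def Claim_exact_compare_sets : Prop := ∀ (guess_list : List Int) (game_list : List Int) (agg_hints : List (List Int)), Dom_compare_sets guess_list game_list agg_hints → Pre_compare_sets guess_list game_list agg_hints → D_compare_sets guess_list game_list agg_hints → compare_sets guess_list game_list agg_hints ≠ compare_sets_alt guess_list game_list agg_hints

-- ===== LEMMAS AND PROOFS =====

-- boolean match predicate on a zip pair
def pvMatch (p : Int × Int) : Bool := decide (p.1 = p.2)
-- phase-1 rewrites of a pair
def pvF1 (p : Int × Int) : Int := if p.1 = p.2 then 0 else p.1
def pvF2 (p : Int × Int) : Int := if p.1 = p.2 then 0 else p.2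
-- the greedy white-pass recursion (mirrors only_color's fold)
def pvW : List Int → List Int → Nat
  | [], _ => 0
  | c :: t, gm =>
    if c ≠ 0 ∧ c ∈ gm then pvW t (gm.set ((PySem.List.index? gm c).getD 0) 0) + 1
    else pvW t gm

theorem pv_set_append (pre : List Int) (x v : Int) (suf : List Int) :
    (pre ++ x :: suf).set pre.length v = pre ++ v :: suf := by
  induction pre with
  | nil => rfl
  | cons a t ih => simp [ih]

theorem pv_phase1 (S : List Int) (gs : List Int) : ∀ (k : Nat) (Xg Xu h : List Int),
    Xg.length = k → Xu.length = k → k + gs.length ≤ S.length →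
    (PySem.List.enumerate gs k).foldl
      (fun st pl =>
        if pl.2 = PySem.List.pyGetD S pl.1 0 then
          (st.1.set pl.1.toNat 0, st.2.1.set pl.1.toNat 0, st.2.2 ++ [0])
        else st)
      (Xg ++ S.drop k, Xu ++ gs, h)
    = (Xg ++ (gs.zip (S.drop k)).map pvF2 ++ S.drop (k + gs.length),
       Xu ++ (gs.zip (S.drop k)).map pvF1,
       h ++ List.replicate ((gs.zip (S.drop k)).countP pvMatch) 0) := by
  induction gs with
  | nil =>
    intro k Xg Xu h _ _ _
    simp [PySem.List.enumerate_nil]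
  | cons a rest ih =>
    intro k Xg Xu h hXg hXu hlen
    have hk : k < S.length := by simp at hlen; omega
    have hdrop : S.drop k = S[k] :: S.drop (k + 1) := List.drop_eq_getElem_cons hk
    have hget : PySem.List.pyGetD S ((k : Nat) : Int) 0 = S[k] := by
      rw [PySem.List.pyGetD_natCast, List.getD_eq_getElem _ _ hk]
    have hlen' : (k + 1) + rest.length ≤ S.length := by simp at hlen; omega
    simp only [PySem.List.enumerate_cons, List.foldl_cons, hget, Int.toNat_natCast]
    by_cases ha : a = S[k]
    · rw [if_pos ha]
      have hset1 : (Xg ++ S.drop k).set k 0 = (Xg ++ [0]) ++ S.drop (k + 1) := by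
        have h' := pv_set_append Xg (S[k]) 0 (S.drop (k+1))
        rw [hXg] at h'
        rw [hdrop, h']
        simp
      have hset2 : (Xu ++ a :: rest).set k 0 = (Xu ++ [0]) ++ rest := by
        have h' := pv_set_append Xu a 0 rest
        rw [hXu] at h'
        rw [h']
        simp
      rw [hset1, hset2]
      have hih := ih (k + 1) (Xg ++ [0]) (Xu ++ [0]) (h ++ [0]) (by simp [hXg]) (by simp [hXu]) hlen'
      push_cast at hih
      rw [hih, hdrop]
      simp only [List.zip_cons_cons, List.map_cons, List.countP_cons, List.length_cons]
      have hm : pvMatch (a, S[k]) = true := by simp [pvMatch, ha]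
      have h2 : pvF2 (a, S[k]) = 0 := by simp [pvF2, ha]
      have h1 : pvF1 (a, S[k]) = 0 := by simp [pvF1, ha]
      rw [hm, h1, h2]
      have hidx : k + (rest.length + 1) = (k + 1) + rest.length := by omega
      rw [hidx]
      simp [List.append_assoc, Nat.add_comm]
      rw [Nat.add_comm 1, List.replicate_succ]
    · rw [if_neg ha]
      have hsplit : Xg ++ S.drop k = (Xg ++ [S[k]]) ++ S.drop (k + 1) := by
        rw [hdrop]; simp
      have hsplit2 : Xu ++ a :: rest = (Xu ++ [a]) ++ rest := by simp
      rw [hsplit, hsplit2]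
      have hih := ih (k + 1) (Xg ++ [S[k]]) (Xu ++ [a]) h (by simp [hXg]) (by simp [hXu]) hlen'
      push_cast at hih
      rw [hih, hdrop]
      simp only [List.zip_cons_cons, List.map_cons, List.countP_cons, List.length_cons]
      have hm : pvMatch (a, S[k]) = false := by simp [pvMatch, ha]
      have h2 : pvF2 (a, S[k]) = S[k] := by simp [pvF2, ha]
      have h1 : pvF1 (a, S[k]) = a := by simp [pvF1, ha]
      rw [hm, h1, h2]
      have hidx : k + (rest.length + 1) = (k + 1) + rest.length := by omega
      rw [hidx]
      simp [List.append_assoc]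

-- B's black fold over enumerate equals the zip match count, under Pre_
theorem pv_black (S : List Int) (gs : List Int) : ∀ (k : Nat) (acc : Int),
    k + gs.length ≤ S.length →
    (PySem.List.enumerate gs k).foldl
      (fun acc pl => acc + (if pl.2 = PySem.List.pyGetD S pl.1 0 then 1 else 0)) acc
    = acc + (((gs.zip (S.drop k)).countP pvMatch : Nat) : Int) := by
  induction gs with
  | nil => intro k acc _; simp [PySem.List.enumerate_nil]
  | cons a rest ih =>
    intro k acc hlen
    have hk : k < S.length := by simp at hlen; omega
    have hdrop : S.drop k = S[k] :: S.drop (k + 1) := List.drop_eq_getElem_cons hk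
    have hget : PySem.List.pyGetD S ((k : Nat) : Int) 0 = S[k] := by
      rw [PySem.List.pyGetD_natCast, List.getD_eq_getElem _ _ hk]
    have hlen' : (k + 1) + rest.length ≤ S.length := by simp at hlen; omega
    simp only [PySem.List.enumerate_cons, List.foldl_cons, hget]
    have hih := ih (k + 1) (acc + (if a = S[k] then 1 else 0)) hlen'
    push_cast at hih
    rw [hih, hdrop]
    simp only [List.zip_cons_cons, List.countP_cons]
    by_cases ha : a = S[k]
    · have hm : pvMatch (a, S[k]) = true := by simp [pvMatch, ha]
      rw [if_pos ha, hm]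
      simp
      ring
    · have hm : pvMatch (a, S[k]) = false := by simp [pvMatch, ha]
      rw [if_neg ha, hm]
      simp

theorem pv_only_color_cons (gm h : List Int) (c : Int) (t : List Int) :
    only_color gm (c :: t) h =
      if c ≠ 0 ∧ c ∈ gm then
        only_color (gm.set ((PySem.List.index? gm c).getD 0) 0) t (h ++ [1])
      else only_color gm t h := by
  unfold only_color
  rw [List.foldl_cons]
  by_cases hc : c ≠ 0 ∧ c ∈ gm
  · simp [hc.1, hc.2]
  · simp [hc]

theorem pv_phase2 (gu : List Int) : ∀ (gm h : List Int),
    (only_color gm gu h).2 = h ++ List.replicate (pvW gu gm) 1 := by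
  induction gu with
  | nil => intro gm h; simp [only_color, pvW]
  | cons c t ih =>
    intro gm h
    rw [pv_only_color_cons]
    by_cases hc : c ≠ 0 ∧ c ∈ gm
    · rw [if_pos hc, ih]
      simp [pvW, hc, List.replicate_succ, List.append_assoc]
    · rw [if_neg hc, ih]
      simp [pvW, hc]

theorem pv_greedy_card (gu : List Int) : ∀ (gm : List Int),
    pvW gu gm =
      Multiset.card ((↑(gu.filter (fun c => decide (c ≠ 0))) : Multiset Int) ∩ ↑gm) := by
  induction gu with
  | nil => intro gm; simp [pvW]
  | cons c t ih =>
    intro gm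
    by_cases hc : c ≠ 0 ∧ c ∈ gm
    · obtain ⟨hc0, hmem⟩ := hc
      obtain ⟨k, hk⟩ := Option.isSome_iff_exists.mp ((PySem.List.index?_isSome_iff gm c).mpr hmem)
      obtain ⟨pre, suf, hgm, hlen, hpre⟩ := (PySem.List.index?_eq_some_iff gm c k).mp hk
      have hset : gm.set k 0 = pre ++ 0 :: suf := by
        rw [hgm, ← hlen]; exact pv_set_append pre c 0 suf
      have e1 : pvW (c :: t) gm = pvW t (gm.set ((PySem.List.index? gm c).getD 0) 0) + 1 := by
        simp [pvW, hc0, hmem]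
      rw [e1, hk, Option.getD_some, hset, ih]
      have hfil : (c :: t).filter (fun x => decide (x ≠ 0)) =
          c :: t.filter (fun x => decide (x ≠ 0)) := by simp [hc0]
      rw [hgm, hfil]
      have hpre0 : List.count c pre = 0 := List.count_eq_zero.mpr hpre
      have hF0 : List.count (0 : Int) (t.filter (fun x => decide (x ≠ 0))) = 0 := by
        rw [List.count_eq_zero]
        intro hmem0
        have hx := (List.mem_filter.mp hmem0).2
        simp at hx
      have key : ((↑(c :: t.filter (fun x => decide (x ≠ 0))) : Multiset Int) ∩ ↑(pre ++ c :: suf))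
          = c ::ₘ ((↑(t.filter (fun x => decide (x ≠ 0))) : Multiset Int) ∩ ↑(pre ++ 0 :: suf)) := by
        ext d
        rw [Multiset.count_inter, Multiset.count_cons, Multiset.count_inter]
        simp only [Multiset.coe_count, List.count_cons, List.count_append]
        by_cases hdc : d = c
        · subst hdc
          have h0c : ¬ (0:Int) = d := fun h => hc0 h.symm
          simp [hpre0, hc0, h0c]
        · by_cases hd0 : d = 0
          · subst hd0
            have hF0' : List.count (0 : Int) (List.filter (fun x => !decide (x = 0)) t) = 0 := by
              simpa using hF0
            simp [hc0, hdc] <;> omega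
          · simp [Ne.symm hdc, Ne.symm hd0] <;> omega
      rw [key, Multiset.card_cons]
    · have e1 : pvW (c :: t) gm = pvW t gm := by simp [pvW, hc]
      rw [e1, ih]
      by_cases hc0 : c = 0
      · subst hc0
        have hfil : ((0 : Int) :: t).filter (fun x => decide (x ≠ 0)) =
            t.filter (fun x => decide (x ≠ 0)) := by simp
        rw [hfil]
      · have hmem : c ∉ gm := by tauto
        have hcnt : List.count c gm = 0 := List.count_eq_zero.mpr hmem
        have hfil : (c :: t).filter (fun x => decide (x ≠ 0)) =
            c :: t.filter (fun x => decide (x ≠ 0)) := by simp [hc0]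
        rw [hfil]
        have key : ((↑(c :: t.filter (fun x => decide (x ≠ 0))) : Multiset Int) ∩ ↑gm)
            = ((↑(t.filter (fun x => decide (x ≠ 0))) : Multiset Int) ∩ ↑gm) := by
          ext d
          rw [Multiset.count_inter, Multiset.count_inter]
          simp only [Multiset.coe_count, List.count_cons]
          by_cases hdc : d = c
          · subst hdc; simp [hcnt]
          · simp [Ne.symm hdc] <;> omega
        rw [key]

theorem pv_snd_zip (G S : List Int) (hn : G.length ≤ S.length) :
    (G.zip S).map Prod.snd ++ S.drop G.length = S := by
  induction G generalizing S with
  | nil => simp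
  | cons a t ih =>
    cases S with
    | nil => simp at hn
    | cons b s =>
      simp only [List.length_cons] at hn
      rw [List.zip_cons_cons, List.map_cons, List.length_cons, List.drop_succ_cons,
          List.cons_append, ih s (by omega)]

theorem pv_count_map (f : Int × Int → Int) (l : List (Int × Int)) (e : Int) :
    List.count e (l.map f) = l.countP (fun p => decide (f p = e)) := by
  rw [List.count_eq_countP, List.countP_map]
  apply List.countP_congr
  intro x _
  simp only [Function.comp_apply, beq_iff_eq, decide_eq_true_eq]

theorem pv_split_match (l : List (Int × Int)) (q : Int × Int → Bool) :
    l.countP q = l.countP (fun p => pvMatch p && q p) + l.countP (fun p => !pvMatch p && q p) := by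
  induction l with
  | nil => simp
  | cons a t ih =>
    simp only [List.countP_cons]
    cases hm : pvMatch a <;> by_cases hq : q a <;> simp [hm, hq, ih] <;> omega

theorem pv_countP_ext (l : List (Int × Int)) (p q : Int × Int → Bool)
    (h : ∀ x, p x = q x) : l.countP p = l.countP q :=
  List.countP_congr (fun x _ => by rw [h x])

theorem pv_key_multiset (G S : List Int) (hn : G.length ≤ S.length) :
    ((↑G : Multiset Int) ∩ ↑S)
    = ((↑(((G.zip S).map pvF1).filter (fun c => decide (c ≠ 0))) : Multiset Int)
         ∩ ↑(((G.zip S).map pvF2) ++ S.drop G.length))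
      + (↑(((G.zip S).filter pvMatch).map Prod.fst) : Multiset Int)
      + Multiset.replicate
          (min (G.count 0) (S.count 0) - (G.zip S).countP (fun p => decide (p.1 = 0 ∧ p.2 = 0))) 0 := by
  have hGfst : G = (G.zip S).map Prod.fst := (List.map_fst_zip hn).symm
  have hS : (G.zip S).map Prod.snd ++ S.drop G.length = S := pv_snd_zip G S hn
  have hcG : ∀ e : Int, List.count e G =
      (G.zip S).countP (fun p => pvMatch p && decide (p.1 = e)) +
      (G.zip S).countP (fun p => !pvMatch p && decide (p.1 = e)) := by
    intro e
    conv_lhs => rw [hGfst]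
    rw [pv_count_map, pv_split_match]
  have hcS : ∀ e : Int, List.count e S =
      (G.zip S).countP (fun p => pvMatch p && decide (p.1 = e)) +
      (G.zip S).countP (fun p => !pvMatch p && decide (p.2 = e)) +
      List.count e (S.drop G.length) := by
    intro e
    conv_lhs => rw [← hS]
    rw [List.count_append, pv_count_map, pv_split_match]
    have hmm : (G.zip S).countP (fun p => pvMatch p && decide (p.2 = e)) =
        (G.zip S).countP (fun p => pvMatch p && decide (p.1 = e)) := by
      apply pv_countP_ext
      intro x
      by_cases h12 : x.1 = x.2 <;> simp [pvMatch, h12]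
    omega
  have hm0 : List.count 0 (((G.zip S).filter pvMatch).map Prod.fst) =
      (G.zip S).countP (fun p => decide (p.1 = 0 ∧ p.2 = 0)) := by
    rw [pv_count_map, List.countP_filter]
    apply pv_countP_ext
    intro x
    by_cases h1 : x.1 = (0:Int) <;> by_cases h2 : x.2 = (0:Int) <;>
      simp [pvMatch, h1, h2] <;> omega
  ext d
  rw [Multiset.count_inter, Multiset.count_add, Multiset.count_add, Multiset.count_inter,
      Multiset.count_replicate]
  simp only [Multiset.coe_count]
  by_cases hd0 : d = 0
  · subst hd0
    have hIA : List.count (0 : Int) (((G.zip S).map pvF1).filter (fun c => decide (c ≠ 0))) = 0 := by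
      rw [List.count_eq_zero]
      intro hmem0
      have hx := (List.mem_filter.mp hmem0).2
      simp at hx
    have hA0 : (G.zip S).countP (fun p => pvMatch p && decide (p.1 = (0:Int))) =
        (G.zip S).countP (fun p => decide (p.1 = 0 ∧ p.2 = 0)) := by
      apply pv_countP_ext
      intro x
      by_cases h12 : x.1 = x.2 <;> by_cases h1 : x.1 = (0:Int) <;>
        simp [pvMatch, h12, h1] <;> omega
    have e1 := hcG 0
    have e2 := hcS 0
    rw [hIA, hm0]
    simp only [if_true]
    omega
  · have hIAl : List.count d (((G.zip S).map pvF1).filter (fun c => decide (c ≠ 0))) =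
        (G.zip S).countP (fun p => !pvMatch p && decide (p.1 = d)) := by
      rw [List.count_filter (by simp [hd0]), pv_count_map]
      apply pv_countP_ext
      intro x
      by_cases h12 : x.1 = x.2 <;> simp [pvF1, pvMatch, h12, hd0] <;> omega
    have hIAr : List.count d ((G.zip S).map pvF2 ++ S.drop G.length) =
        (G.zip S).countP (fun p => !pvMatch p && decide (p.2 = d)) +
        List.count d (S.drop G.length) := by
      rw [List.count_append, pv_count_map]
      congr 1
      apply pv_countP_ext
      intro x
      by_cases h12 : x.1 = x.2 <;> simp [pvF2, pvMatch, h12, hd0] <;> omega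
    have hM : List.count d (((G.zip S).filter pvMatch).map Prod.fst) =
        (G.zip S).countP (fun p => pvMatch p && decide (p.1 = d)) := by
      rw [pv_count_map, List.countP_filter]
      apply pv_countP_ext
      intro x
      cases hm : pvMatch x <;> simp [hm]
    have e1 := hcG d
    have e2 := hcS d
    rw [hIAl, hIAr, hM]
    rw [if_neg (fun h => hd0 h.symm)]
    omega

theorem pv_total_card (G S : List Int) :
    ((PySem.List.dedup G).map (fun c => min (G.count c) (S.count c))).sum
      = Multiset.card ((↑G : Multiset Int) ∩ ↑S) := by
  have hnd := PySem.List.nodup_dedup G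
  have hfs : (PySem.List.dedup G).toFinset = G.toFinset := by
    ext x; simp [List.mem_toFinset, PySem.List.mem_dedup]
  rw [← List.sum_toFinset _ hnd, hfs]
  rw [← Multiset.toFinset_sum_count_eq ((↑G : Multiset Int) ∩ ↑S)]
  rw [Multiset.toFinset_inter]
  have hco : (↑G : Multiset Int).toFinset = G.toFinset := by
    ext x; simp
  have hcoS : (↑S : Multiset Int).toFinset = S.toFinset := by
    ext x; simp
  rw [hco, hcoS]
  rw [← Finset.sum_subset (Finset.inter_subset_left (s₂ := S.toFinset))]
  · apply Finset.sum_congr rfl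
    intro x _
    rw [Multiset.count_inter]
    simp [Multiset.coe_count]
  · intro x _ hnx
    have hxs : x ∉ S := by
      intro hx
      exact hnx (Finset.mem_inter.mpr ⟨by assumption, List.mem_toFinset.mpr hx⟩)
    have hz : S.count x = 0 := List.count_eq_zero.mpr hxs
    simp [hz]

theorem pv_master (G S : List Int) (agg : List (List Int)) (hn : G.length ≤ S.length) :
    ∃ bl w k : Nat,
      compare_sets G S agg = agg ++ [List.replicate bl 0 ++ List.replicate w 1] ∧
      compare_sets_alt G S agg = agg ++ [List.replicate bl 0 ++ List.replicate (w + k) 1] ∧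
      (D_compare_sets G S agg ↔ 0 < k) := by
  have hm0G : (G.zip S).countP (fun p => decide (p.1 = 0 ∧ p.2 = 0)) ≤ List.count 0 G := by
    conv_rhs => rw [(List.map_fst_zip hn).symm]
    rw [pv_count_map]
    apply List.countP_mono_left
    intro x _ hx
    simp at hx ⊢
    exact hx.1
  have hm0S : (G.zip S).countP (fun p => decide (p.1 = 0 ∧ p.2 = 0)) ≤ List.count 0 S := by
    conv_rhs => rw [← pv_snd_zip G S hn]
    rw [List.count_append, pv_count_map]
    have hle : (G.zip S).countP (fun p => decide (p.1 = 0 ∧ p.2 = 0)) ≤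
        (G.zip S).countP (fun p => decide (p.2 = (0:Int))) := by
      apply List.countP_mono_left
      intro x _ hx
      simp at hx ⊢
      exact hx.2
    omega
  refine ⟨(G.zip S).countP pvMatch,
          pvW ((G.zip S).map pvF1) ((G.zip S).map pvF2 ++ S.drop G.length),
          min (List.count 0 G) (List.count 0 S) -
            (G.zip S).countP (fun p => decide (p.1 = 0 ∧ p.2 = 0)), ?_, ?_, ?_⟩
  · -- A side
    have h1 : color_and_position G S [] =
        ((G.zip S).map pvF2 ++ S.drop G.length, (G.zip S).map pvF1,
         List.replicate ((G.zip S).countP pvMatch) 0) := by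
      have h := pv_phase1 S G 0 [] [] [] rfl rfl (by omega)
      unfold color_and_position
      simpa using h
    simp only [compare_sets]
    rw [h1]
    rw [pv_phase2]
    try simp
  · -- B side
    have hcard : Multiset.card ((↑G : Multiset Int) ∩ ↑S) =
        pvW ((G.zip S).map pvF1) ((G.zip S).map pvF2 ++ S.drop G.length) +
        (G.zip S).countP pvMatch +
        (min (List.count 0 G) (List.count 0 S) -
          (G.zip S).countP (fun p => decide (p.1 = 0 ∧ p.2 = 0))) := by
      rw [pv_key_multiset G S hn]
      rw [Multiset.card_add, Multiset.card_add, Multiset.card_replicate]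
      rw [Multiset.coe_card, List.length_map, ← List.countP_eq_length_filter]
      rw [← pv_greedy_card]
      try rfl
    have hblack : ((PySem.List.enumerate G).foldl
        (fun acc pl => acc + (if pl.2 = PySem.List.pyGetD S pl.1 0 then 1 else 0)) (0:Int)) =
        (((G.zip S).countP pvMatch : Nat) : Int) := by
      have := pv_black S G 0 0 (by omega)
      simpa using this
    have htotal : ((PySem.Set.ofList G).foldl
        (fun acc c => acc + min ((PySem.List.count G c : Int)) ((PySem.List.count S c : Int))) 0) =
        ((Multiset.card ((↑G : Multiset Int) ∩ ↑S) : Nat) : Int) := by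
      rw [← PySem.List.dedup_eq_ofList]
      rw [PySem.List.foldl_add (PySem.List.dedup G)
        (fun c => min ((PySem.List.count G c : Int)) ((PySem.List.count S c : Int))) 0]
      rw [← pv_total_card G S]
      rw [Nat.cast_list_sum]
      rw [show ((PySem.List.dedup G).map (fun c =>
            min ((PySem.List.count G c : Int)) ((PySem.List.count S c : Int)))) =
          ((PySem.List.dedup G).map (fun c => min (G.count c) (S.count c))).map Nat.cast from by
        rw [List.map_map]
        apply List.map_congr_left
        intro x _
        simp only [Function.comp_apply, PySem.List.count_eq, Nat.cast_min]]
      simp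
    simp only [compare_sets_alt]
    rw [hblack, htotal, hcard]
    have h1 : ((((G.zip S).countP pvMatch : Nat) : Int)).toNat = (G.zip S).countP pvMatch :=
      Int.toNat_natCast _
    have h2 : ((((pvW ((G.zip S).map pvF1) ((G.zip S).map pvF2 ++ S.drop G.length) +
        (G.zip S).countP pvMatch +
        (min (List.count 0 G) (List.count 0 S) -
          (G.zip S).countP (fun p => decide (p.1 = 0 ∧ p.2 = 0))) : Nat) : Int)) -
        (((G.zip S).countP pvMatch : Nat) : Int)).toNat =
        pvW ((G.zip S).map pvF1) ((G.zip S).map pvF2 ++ S.drop G.length) +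
        (min (List.count 0 G) (List.count 0 S) -
          (G.zip S).countP (fun p => decide (p.1 = 0 ∧ p.2 = 0))) := by
      omega
    rw [h1, h2]
    try simp
  · -- D iff
    unfold D_compare_sets
    omega

-- ===== VERDICT (by name: the statement is the Claim_ definition above) =====
theorem compare_sets_spec : Claim_unchanged_compare_sets := by
  intro G S agg _ hpre
  unfold Spec_compare_sets
  intro hnd
  obtain ⟨bl, w, k, hA, hB, hDk⟩ := pv_master G S agg hpre
  have hk : k = 0 := by
    by_contra hk0
    exact hnd (hDk.mpr (by omega))
  rw [hA, hB, hk]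
  try simp

theorem compare_sets_changed : Claim_changed_compare_sets := by
  unfold Claim_changed_compare_sets; decide

theorem compare_sets_tight : Claim_exact_compare_sets := by
  intro G S agg _ hpre hD heq
  obtain ⟨bl, w, k, hA, hB, hDk⟩ := pv_master G S agg hpre
  have hk : 0 < k := hDk.mp hD
  rw [hA, hB] at heq
  have hsing := List.append_cancel_left heq
  have hlists : List.replicate bl (0:Int) ++ List.replicate w 1 =
      List.replicate bl 0 ++ List.replicate (w + k) 1 := by
    injection hsing with hh _
  have hlen := congrArg List.length hlists
  simp at hlen
  omega
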